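-- pv_equiv track=rewrite | github.com/Network-of-BioThings/myvariant.info | src/dataload/sources/grasp/grasp_parser.py | row_generator
-- ===== SOURCE A (Python) =====
-- VALID_COLUMN_NO = 70
--
-- def row_generator(db_row):
--     ind = range(VALID_COLUMN_NO)
--     row = []
--     for i in ind:
--         try:
--             row.append(db_row[i])
--         except:
--             row.append('')
--     return row
-- ===== SOURCE B (Python) =====
-- VALID_COLUMN_NO = 70
--
-- def row_generator(db_row):
--     row = list(db_row[:VALID_COLUMN_NO])
--     row += [''] * (VALID_COLUMN_NO - len(row))
--     return row
-- ===== Notes on version B (the rewrite author's own statement) =====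
-- stated objective: simpler
-- what changed: Replaces the 70-iteration try/except index loop with a slice of the first 70 elements plus one padding concatenation.
import Mathlib
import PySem

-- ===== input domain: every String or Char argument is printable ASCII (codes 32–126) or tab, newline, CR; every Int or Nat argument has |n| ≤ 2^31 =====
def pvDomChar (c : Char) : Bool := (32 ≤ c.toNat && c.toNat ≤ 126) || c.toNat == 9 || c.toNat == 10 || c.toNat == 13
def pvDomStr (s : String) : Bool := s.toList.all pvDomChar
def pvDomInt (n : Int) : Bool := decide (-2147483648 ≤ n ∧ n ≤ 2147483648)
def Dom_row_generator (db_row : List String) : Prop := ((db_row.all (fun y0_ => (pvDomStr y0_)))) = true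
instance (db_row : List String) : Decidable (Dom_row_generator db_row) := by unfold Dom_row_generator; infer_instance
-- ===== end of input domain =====

-- B replaces A's per-index try/except loop by a slice plus one padding concatenation (simpler).

-- ===== PORT A =====
def row_generator (db_row : List String) : List String :=
  (PySem.List.pyRange 0 70 1).foldl
    (fun row i =>
      row ++ [match PySem.List.pyGet? db_row i with
              | some x => x
              | none => ""]) []

-- ===== PORT B =====
def row_generator_alt (db_row : List String) : List String :=
  let row := PySem.List.slice db_row none (some 70)
  row ++ List.replicate (70 - row.length) ""

-- ===== PRECONDITION & SPEC =====
def Spec_row_generator (db_row : List String) (out : List String) : Prop := out = row_generator_alt db_row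
instance (db_row : List String) (out : List String) : Decidable (Spec_row_generator db_row out) := by unfold Spec_row_generator; infer_instance

-- ===== CLAIM (what is proved, stated in full; the proofs are below) =====
def Claim_equal_row_generator : Prop := ∀ (db_row : List String), Dom_row_generator db_row → Spec_row_generator db_row (row_generator db_row)

-- ===== LEMMAS AND PROOFS =====

theorem take_pad (n : Nat) (db : List String) :
    (List.range n).map (fun k => db[k]?.getD "") =
      db.take n ++ List.replicate (n - (db.take n).length) "" := by
  induction db generalizing n with
  | nil => simp [List.map_const']
  | cons x xs ih =>
    cases n with
    | zero => simp
    | succ m =>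
      simp [List.range_succ_eq_map, List.map_map, Function.comp_def, ih m]

theorem row_generator_spec : Claim_equal_row_generator := by
  intro db _
  show row_generator db = row_generator_alt db
  unfold row_generator row_generator_alt
  rw [PySem.List.pyRange_one, List.foldl_map, PySem.List.foldl_append_singleton_eq_map]
  have h70 : PySem.List.slice db none (some 70) = db.take 70 := by
    exact_mod_cast PySem.List.slice_to_natCast db 70
  simp only [List.nil_append, h70]
  have h : ((70:Int) - 0).toNat = 70 := by decide
  rw [h, ← take_pad 70 db]
  apply List.map_congr_left
  intro k _
  simp [PySem.List.pyGet?_natCast]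
  cases db[k]? <;> simp [Option.getD]
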